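-- pv_equiv track=rewrite | github.com/Leling666/RC-Detection | RC-Detection/buildGraph/parse_patch.py | parse_commit_msg
-- ===== SOURCE A (Python) =====
-- def parse_commit_msg(lines: list):
--     cmsg = ""
--     i = 0
--     for line in lines:
--         i = i + 1
--         if line.startswith("Subject: [PATCH]"):
--             cmsg = cmsg + line[len("Subject: [PATCH]") :]
--         elif line == "---":
--             return cmsg.strip(), i
--         else:
--             cmsg = cmsg + "\n" + line
-- ===== SOURCE B (Python) =====
-- def parse_commit_msg(lines: list):
--     if "---" not in lines:
--         return None
--     i = lines.index("---")
--     parts = []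
--     for line in lines[:i]:
--         if line.startswith("Subject: [PATCH]"):
--             parts.append(line[len("Subject: [PATCH]"):])
--         else:
--             parts.append("\n" + line)
--     return "".join(parts).strip(), i + 1
-- ===== Notes on version B (the rewrite author's own statement) =====
-- stated objective: faster
-- what changed: Replaces the fused loop (embedded return, message built by repeated string concatenation) with two passes: locate '---' via list index, then map lines[:i] to pieces and join them once, avoiding quadratic string rebuilding.
-- outside the precondition, e.g. on parse_commit_msg(['a', 'b']): A returns None, B returns None
import Mathlib
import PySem

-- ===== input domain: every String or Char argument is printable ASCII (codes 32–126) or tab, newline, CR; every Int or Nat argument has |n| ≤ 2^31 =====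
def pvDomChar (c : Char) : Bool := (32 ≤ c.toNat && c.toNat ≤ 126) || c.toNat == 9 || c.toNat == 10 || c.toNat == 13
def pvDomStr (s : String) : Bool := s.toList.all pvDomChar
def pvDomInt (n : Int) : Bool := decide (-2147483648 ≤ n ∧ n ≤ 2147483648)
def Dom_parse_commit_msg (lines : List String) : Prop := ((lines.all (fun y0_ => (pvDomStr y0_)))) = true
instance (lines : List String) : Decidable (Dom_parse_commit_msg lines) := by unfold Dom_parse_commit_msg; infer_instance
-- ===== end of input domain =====

-- B separates delimiter detection (index of "---") from assembly by a single map + join (linear, vs A's repeated string concatenation);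
-- equivalence is about the return value only. String concatenation is done on List Char (exact for Python str +).

-- ===== PORT A =====
-- the for-loop of A: accumulator cmsg (as List Char), counter i; returns none when the loop falls through (Python returns None)
def pcmGo : List String → List Char → Int → Option (String × Int)
  | [], _, _ => none
  | line :: rest, cmsg, i =>
    if PySem.Chars.startswith line.toList "Subject: [PATCH]".toList then
      pcmGo rest (cmsg ++ PySem.Chars.slice line.toList (some 16) none) (i + 1)
    else if line == "---" then
      some (String.ofList (PySem.Chars.strip cmsg), i + 1)
    else
      pcmGo rest (cmsg ++ '\n' :: line.toList) (i + 1)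

def parse_commit_msg (lines : List String) : String × Int :=
  (pcmGo lines [] 0).getD ("", 0)

-- ===== PORT B =====
def pcmPiece (line : String) : List Char :=
  if PySem.Chars.startswith line.toList "Subject: [PATCH]".toList then
    PySem.Chars.slice line.toList (some 16) none
  else
    '\n' :: line.toList

def parse_commit_msg_alt (lines : List String) : String × Int :=
  match PySem.List.index? lines "---" with
  | none => ("", 0)   -- Source B returns None here; outside Pre_
  | some k =>
    let parts := (PySem.List.slice lines none (some (k : Int))).map pcmPiece
    (String.ofList (PySem.Chars.strip (PySem.Chars.join [] parts)), (k : Int) + 1)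

-- ===== PRECONDITION & SPEC =====
-- Pre_ excludes inputs with no "---" line, on which A returns None (not a value of the declared pair type).
def Pre_parse_commit_msg (lines : List String) : Prop := "---" ∈ lines
instance (lines : List String) : Decidable (Pre_parse_commit_msg lines) := by unfold Pre_parse_commit_msg; infer_instance
def pvWitness_parse_commit_msg : List String := ["Subject: [PATCH] fix bug", "body line", "---", "diff"]
def Spec_parse_commit_msg (lines : List String) (out : String × Int) : Prop := out = parse_commit_msg_alt lines
instance (lines : List String) (out : String × Int) : Decidable (Spec_parse_commit_msg lines out) := by unfold Spec_parse_commit_msg; infer_instance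

-- ===== CLAIM (what is proved, stated in full; the proofs are below) =====
def Claim_equal_parse_commit_msg : Prop := ∀ (lines : List String), Dom_parse_commit_msg lines → Pre_parse_commit_msg lines → Spec_parse_commit_msg lines (parse_commit_msg lines)

-- ===== LEMMAS AND PROOFS =====

-- characterisation of A's loop by the position of the first "---"
theorem pcmGo_eq (lines : List String) : ∀ (cmsg : List Char) (i : Int),
    pcmGo lines cmsg i = (PySem.List.index? lines "---").map
      (fun k => (String.ofList (PySem.Chars.strip (cmsg ++ ((lines.take k).map pcmPiece).flatten)), i + (k : Int) + 1)) := by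
  induction lines with
  | nil => intro cmsg i; simp [pcmGo, PySem.List.index?]
  | cons line rest ih =>
    intro cmsg i
    by_cases hd : line = "---"
    · subst hd
      rw [pcmGo, if_neg (by decide), if_pos (by decide), PySem.List.index?_cons_self]
      simp
    · have hidx := PySem.List.index?_cons_of_ne (xs := rest) (v := "---") hd
      by_cases hs : PySem.Chars.startswith line.toList "Subject: [PATCH]".toList = true
      · have hpl : pcmPiece line = PySem.Chars.slice line.toList (some 16) none := by
          rw [pcmPiece, if_pos hs]
        rw [pcmGo, hidx, if_pos hs, ih]
        cases h : PySem.List.index? rest "---" with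
        | none => simp
        | some k =>
          simp [List.take_succ_cons, hpl]
          omega
      · have hpl : pcmPiece line = '\n' :: line.toList := by
          rw [pcmPiece, if_neg hs]
        rw [pcmGo, hidx, if_neg hs, if_neg (by simp [hd]), ih]
        cases h : PySem.List.index? rest "---" with
        | none => simp
        | some k =>
          simp [List.take_succ_cons, hpl]
          omega

theorem join_nil_eq_flatten (parts : List (List Char)) : PySem.Chars.join [] parts = parts.flatten := by
  induction parts with
  | nil => rfl
  | cons p ps ih =>
    cases ps with
    | nil => rw [PySem.Chars.join_singleton]; simp
    | cons q qs =>
      rw [PySem.Chars.join_cons_cons]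
      simp only [List.flatten_cons]
      rw [ih]
      simp

-- ===== VERDICT (by name: the statement is the Claim_ definition above) =====
theorem parse_commit_msg_spec : Claim_equal_parse_commit_msg := by
  intro lines _ hpre
  unfold Spec_parse_commit_msg parse_commit_msg parse_commit_msg_alt
  rw [pcmGo_eq]
  cases h : PySem.List.index? lines "---" with
  | none =>
    exact absurd hpre (by rw [Pre_parse_commit_msg, ← PySem.List.index?_isSome_iff, h]; simp)
  | some k =>
    simp only [Option.map_some, Option.getD_some]
    rw [PySem.List.slice_to_natCast, join_nil_eq_flatten]
    simp
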